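-- pv_equiv track=rewrite | github.com/bedwards/channels | src/format/notebooklm_video.py | _extract_first_section
-- ===== SOURCE A (Python) =====
-- def _extract_first_section(content: str) -> str:
--     """Extract the first major section of content."""
--     lines = content.split("\n")
--     section_lines = []
--     in_section = False
--
--     for line in lines:
--         if line.strip().startswith("# ") and not in_section:
--             in_section = True
--             continue
--         if line.strip().startswith("## ") and in_section:
--             if section_lines:
--                 break
--             continue
--         if in_section:
--             section_lines.append(line)
--
--     text = "\n".join(section_lines).strip()
--     return text[:1000] if text else "See full analysis below."
-- ===== SOURCE B (Python) =====
-- def _extract_first_section(content: str) -> str: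
--     """Extract the first major section of content (find-heading / skip-subheads / take-until decomposition)."""
--     lines = content.split("\n")
--     rest = None
--     for k, line in enumerate(lines):
--         if line.strip().startswith("# "):
--             rest = lines[k + 1:]
--             break
--     body = []
--     if rest is not None:
--         j = 0
--         while j < len(rest) and rest[j].strip().startswith("## "):
--             j += 1
--         for line in rest[j:]:
--             if line.strip().startswith("## "):
--                 break
--             body.append(line)
--     text = "\n".join(body).strip()
--     return text[:1000] if text else "See full analysis below."
-- ===== Notes on version B (the rewrite author's own statement) =====
-- stated objective: simpler
-- what changed: Replaced A's single stateful scan (in_section flag plus emptiness-tested accumulator with break/continue) by a three-phase decomposition: find the first level-1 heading line and slice after it, advance an index past leading level-2 subheading lines, then collect lines until the next level-2 subheading.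
import Mathlib
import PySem

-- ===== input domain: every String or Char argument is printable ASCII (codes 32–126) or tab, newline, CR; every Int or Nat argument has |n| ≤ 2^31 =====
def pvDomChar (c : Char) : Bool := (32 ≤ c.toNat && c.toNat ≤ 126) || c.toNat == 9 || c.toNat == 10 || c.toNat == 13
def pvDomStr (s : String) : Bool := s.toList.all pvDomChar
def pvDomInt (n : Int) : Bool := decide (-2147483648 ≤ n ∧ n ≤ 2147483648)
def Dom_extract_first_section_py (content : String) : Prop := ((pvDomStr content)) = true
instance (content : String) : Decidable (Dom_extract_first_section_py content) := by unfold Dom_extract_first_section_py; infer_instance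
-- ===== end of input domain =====

-- B replaces A's single stateful loop (in_section flag + emptiness-tested accumulator) by a
-- find-heading / skip-subheads / take-until decomposition; objective: simpler (same O(n) cost).

-- ===== PORT A =====
-- shared with B: both Pythons literally test `line.strip().startswith(...)`
def pvIsH1 (l : String) : Bool := PySem.Str.startswith (PySem.Str.strip l) "# "
def pvIsH2 (l : String) : Bool := PySem.Str.startswith (PySem.Str.strip l) "## "

-- A's for-loop over lines with state (section_lines, in_section); early `break` = returning sl
def pvLoopA : List String → List String → Bool → List String
  | [], sl, _ => sl
  | l :: ls, sl, ins =>
    if pvIsH1 l && !ins then pvLoopA ls sl true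
    else if pvIsH2 l && ins then (if sl.isEmpty then pvLoopA ls sl ins else sl)
    else if ins then pvLoopA ls (sl ++ [l]) ins
    else pvLoopA ls sl ins

def extract_first_section_py (content : String) : String :=
  let lines := (PySem.Str.split? content "\n").getD []   -- sep "\n" ≠ "": split? is always `some`
  let text := PySem.Str.strip (PySem.Str.join "\n" (pvLoopA lines [] false))
  if text = "" then "See full analysis below." else PySem.Str.slice text none (some 1000)

-- ===== PORT B =====
-- Source B's first for-loop: the suffix of lines after the first '# ' heading (None if no heading)
def pvAfterH1 : List String → Option (List String)
  | [] => none
  | l :: ls => if pvIsH1 l then some ls else pvAfterH1 ls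

-- Source B's while-loop advancing j past leading '## ' lines (rest[j:])
def pvSkipH2 : List String → List String
  | [] => []
  | l :: ls => if pvIsH2 l then pvSkipH2 ls else l :: ls

-- Source B's second for-loop: append until a '## ' line, then break
def pvTakeBody : List String → List String
  | [] => []
  | l :: ls => if pvIsH2 l then [] else l :: pvTakeBody ls

def extract_first_section_py_alt (content : String) : String :=
  let lines := (PySem.Str.split? content "\n").getD []   -- sep "\n" ≠ "": split? is always `some`
  let body := match pvAfterH1 lines with
    | none => []
    | some rest => pvTakeBody (pvSkipH2 rest)
  let text := PySem.Str.strip (PySem.Str.join "\n" body)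
  if text = "" then "See full analysis below." else PySem.Str.slice text none (some 1000)

-- ===== PRECONDITION & SPEC =====
def Spec_extract_first_section_py (content : String) (out : String) : Prop := out = extract_first_section_py_alt content
instance (content : String) (out : String) : Decidable (Spec_extract_first_section_py content out) := by unfold Spec_extract_first_section_py; infer_instance

-- ===== CLAIM (what is proved, stated in full; the proofs are below) =====
def Claim_equal_extract_first_section_py : Prop := ∀ (content : String), Dom_extract_first_section_py content → Spec_extract_first_section_py content (extract_first_section_py content)

-- ===== LEMMAS AND PROOFS =====

-- Before the heading: A's loop ignores every line; at the first '# ' line it flips in_section.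
theorem pvLoopA_pre (ls : List String) :
    pvLoopA ls [] false = (match pvAfterH1 ls with
      | none => []
      | some rest => pvLoopA rest [] true) := by
  induction ls with
  | nil => simp [pvLoopA, pvAfterH1]
  | cons l ls ih =>
    by_cases h : pvIsH1 l = true <;> simp [pvLoopA, pvAfterH1, h, ih]

-- With a nonempty accumulator, A's loop appends until the first '## ' line.
theorem pvLoopA_body (ls : List String) (sl : List String) (h : sl ≠ []) :
    pvLoopA ls sl true = sl ++ pvTakeBody ls := by
  induction ls generalizing sl with
  | nil => simp [pvLoopA, pvTakeBody]
  | cons l ls ih =>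
    by_cases h2 : pvIsH2 l = true
    · simp [pvLoopA, pvTakeBody, h2, List.isEmpty_iff, h]
    · by_cases h1 : pvIsH1 l = true <;>
        simp [pvLoopA, pvTakeBody, h1, h2, ih (sl ++ [l]) (by simp)]

-- In the section with an empty accumulator: skip '## ' lines, then run with the first kept line.
theorem pvLoopA_skip (ls : List String) :
    pvLoopA ls [] true = pvTakeBody (pvSkipH2 ls) := by
  induction ls with
  | nil => simp [pvLoopA, pvSkipH2, pvTakeBody]
  | cons l ls ih =>
    by_cases h2 : pvIsH2 l = true
    · simp [pvLoopA, pvSkipH2, h2, ih]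
    · by_cases h1 : pvIsH1 l = true <;>
        simp [pvLoopA, pvSkipH2, pvTakeBody, h1, h2, pvLoopA_body ls [l] (by simp)]

-- ===== VERDICT (by name: the statement is the Claim_ definition above) =====
theorem extract_first_section_py_spec : Claim_equal_extract_first_section_py := by
  intro content _
  unfold Spec_extract_first_section_py extract_first_section_py extract_first_section_py_alt
  simp only [pvLoopA_pre, pvLoopA_skip]
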